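-- pv_equiv track=rewrite | github.com/jinyh/agent-memory-survey | src/memory/evaluation.py | compute_coverage_matrix
-- ===== SOURCE A (Python) =====
-- from typing import Any
--
-- def compute_coverage_matrix(cases: list[dict[str, Any]]) -> dict[str, bool]:
--     sources = {str(case.get("source", "")) for case in cases}
--     splits = {str(case.get("split", "")) for case in cases}
--     return {
--         "formation": "Test_Time_Learning" in splits or "formation" in splits,
--         "evolution": "Conflict_Resolution" in splits or "evolution" in splits,
--         "retrieval": bool({"locomo", "longmemeval", "ama-bench", "memoryarena"} & sources),
--         "memory_in_use": bool({"ama-bench", "memoryarena", "longmemeval"} & sources),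
--     }
-- ===== SOURCE B (Python) =====
-- from typing import Any
--
-- def compute_coverage_matrix(cases: list[dict[str, Any]]) -> dict[str, bool]:
--     def any_match(key: str, values: tuple[str, ...]) -> bool:
--         return any(str(case.get(key, "")) in values for case in cases)
--     return {
--         "formation": any_match("split", ("Test_Time_Learning", "formation")),
--         "evolution": any_match("split", ("Conflict_Resolution", "evolution")),
--         "retrieval": any_match("source", ("locomo", "longmemeval", "ama-bench", "memoryarena")),
--         "memory_in_use": any_match("source", ("ama-bench", "memoryarena", "longmemeval")),
--     }
-- ===== Notes on version B (the rewrite author's own statement) =====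
-- stated objective: idiomatic
-- what changed: Drops A's two intermediate set comprehensions and set-intersection queries: B answers each of the four flags by its own short-circuiting any() scan over the cases via one shared any_match helper, building no intermediate collections.
import Mathlib
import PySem

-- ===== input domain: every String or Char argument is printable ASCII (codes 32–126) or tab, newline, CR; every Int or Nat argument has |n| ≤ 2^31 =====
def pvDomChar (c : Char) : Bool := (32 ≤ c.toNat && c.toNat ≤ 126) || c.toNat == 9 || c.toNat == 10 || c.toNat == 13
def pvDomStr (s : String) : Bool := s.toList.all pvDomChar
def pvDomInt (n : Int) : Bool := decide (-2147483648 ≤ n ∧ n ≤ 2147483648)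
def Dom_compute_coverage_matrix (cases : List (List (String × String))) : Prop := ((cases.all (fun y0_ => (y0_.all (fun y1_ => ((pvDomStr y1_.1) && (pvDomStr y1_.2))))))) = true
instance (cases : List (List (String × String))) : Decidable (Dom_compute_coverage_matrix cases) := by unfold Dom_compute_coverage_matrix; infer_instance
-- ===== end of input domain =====

-- B drops A's intermediate sets and answers each flag with its own any()-scan via a shared helper (objective: idiomatic).

-- ===== PORT A =====
def compute_coverage_matrix (cases : List (List (String × String))) : List (String × Bool) :=
  let sources : PySem.Set String :=
    PySem.Set.ofList (cases.map (fun c => PySem.Dict.getD (PySem.Dict.mk c) "source" ""))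
  let splits : PySem.Set String :=
    PySem.Set.ofList (cases.map (fun c => PySem.Dict.getD (PySem.Dict.mk c) "split" ""))
  [("formation", splits.contains "Test_Time_Learning" || splits.contains "formation"),
   ("evolution", splits.contains "Conflict_Resolution" || splits.contains "evolution"),
   ("retrieval", !(PySem.Set.inter (PySem.Set.ofList ["locomo", "longmemeval", "ama-bench", "memoryarena"]) sources).isEmpty),
   ("memory_in_use", !(PySem.Set.inter (PySem.Set.ofList ["ama-bench", "memoryarena", "longmemeval"]) sources).isEmpty)]

-- ===== PORT B =====
-- the any_match helper of Source B: one short-circuiting scan per flag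
def pvAnyMatch (cases : List (List (String × String))) (key : String) (values : List String) : Bool :=
  cases.any (fun c => values.contains (PySem.Dict.getD (PySem.Dict.mk c) key ""))

def compute_coverage_matrix_alt (cases : List (List (String × String))) : List (String × Bool) :=
  [("formation", pvAnyMatch cases "split" ["Test_Time_Learning", "formation"]),
   ("evolution", pvAnyMatch cases "split" ["Conflict_Resolution", "evolution"]),
   ("retrieval", pvAnyMatch cases "source" ["locomo", "longmemeval", "ama-bench", "memoryarena"]),
   ("memory_in_use", pvAnyMatch cases "source" ["ama-bench", "memoryarena", "longmemeval"])]

-- ===== PRECONDITION & SPEC =====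
def Spec_compute_coverage_matrix (cases : List (List (String × String))) (out : List (String × Bool)) : Prop := out = compute_coverage_matrix_alt cases
instance (cases : List (List (String × String))) (out : List (String × Bool)) : Decidable (Spec_compute_coverage_matrix cases out) := by unfold Spec_compute_coverage_matrix; infer_instance

-- ===== CLAIM (what is proved, stated in full; the proofs are below) =====
def Claim_equal_compute_coverage_matrix : Prop := ∀ (cases : List (List (String × String))), Dom_compute_coverage_matrix cases → Spec_compute_coverage_matrix cases (compute_coverage_matrix cases)

-- ===== LEMMAS AND PROOFS =====

-- membership in A's comprehension set is a List.any over cases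
theorem contains_ofList_map (cases : List (List (String × String))) (k x : String) :
    (PySem.Set.ofList (cases.map (fun c => PySem.Dict.getD (PySem.Dict.mk c) k ""))).contains x
    = cases.any (fun c => PySem.Dict.getD (PySem.Dict.mk c) k "" == x) := by
  rw [Bool.eq_iff_iff]
  simp only [PySem.Set.contains, List.contains_iff_mem, PySem.Set.mem_ofList, List.mem_map,
    List.any_eq_true, beq_iff_eq]

-- nonemptiness of (literal set ∩ sources) is pvAnyMatch over the literal values
theorem inter_nonempty_anyMatch (cases : List (List (String × String))) (lit : List String) :
    (!(PySem.Set.inter (PySem.Set.ofList lit)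
        (PySem.Set.ofList (cases.map (fun c => PySem.Dict.getD (PySem.Dict.mk c) "source" "")))).isEmpty)
    = pvAnyMatch cases "source" lit := by
  rw [Bool.eq_iff_iff]
  simp only [pvAnyMatch, PySem.Set.inter, Bool.not_eq_true', List.isEmpty_eq_false_iff_exists_mem,
    List.mem_filter, PySem.Set.mem_ofList, List.mem_map, List.any_eq_true,
    PySem.Set.contains, List.contains_iff_mem]
  constructor
  · rintro ⟨x, hx, c, hc, rfl⟩; exact ⟨c, hc, hx⟩
  · rintro ⟨c, hc, h⟩; exact ⟨_, h, c, hc, rfl⟩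

-- an OR of two split-membership queries is pvAnyMatch over the two values
theorem contains_pair_anyMatch (cases : List (List (String × String))) (k a b : String) :
    ((PySem.Set.ofList (cases.map (fun c => PySem.Dict.getD (PySem.Dict.mk c) k ""))).contains a
      || (PySem.Set.ofList (cases.map (fun c => PySem.Dict.getD (PySem.Dict.mk c) k ""))).contains b)
    = pvAnyMatch cases k [a, b] := by
  rw [Bool.eq_iff_iff]
  simp only [contains_ofList_map, pvAnyMatch, Bool.or_eq_true, List.any_eq_true,
    List.contains_iff_mem, List.mem_cons, List.not_mem_nil, or_false, beq_iff_eq]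
  aesop

-- ===== VERDICT (by name: the statement is the Claim_ definition above) =====
theorem compute_coverage_matrix_spec : Claim_equal_compute_coverage_matrix := by
  intro cases _
  show compute_coverage_matrix cases = compute_coverage_matrix_alt cases
  simp only [compute_coverage_matrix, compute_coverage_matrix_alt,
    contains_pair_anyMatch, inter_nonempty_anyMatch]
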